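-- pv_equiv track=rewrite | github.com/leehyeji319/PS | 기출/WTC4.py | solution
-- ===== SOURCE A (Python) =====
-- def solution(s):
--     answer = []
--     cnt = 1
--     for i in range(len(s) - 1):
--         if s[i] == s[i + 1]:
--             cnt += 1
--         else:
--             answer.append(cnt)
--             cnt = 1
--     answer.append(cnt)
--
--     if s[0] == s[-1]:
--         answer[0] += answer[-1]
--         del answer[-1]
--     answer.sort()
--
--     return answer
-- ===== SOURCE B (Python) =====
-- def solution(s):
--     # Rotate to a run boundary and scan runs once: no post-hoc wrap merge.
--     n = len(s)
--     k = 0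
--     while k < n and s[k] == s[0]:
--         k += 1
--     if k == n:
--         # uniform (or empty) string: the single run merges into itself and vanishes
--         return []
--     t = s[k:] + s[:k] if s[0] == s[-1] else s
--     runs = []
--     i = 0
--     while i < n:
--         j = i
--         while j < n and t[j] == t[i]:
--             j += 1
--         runs.append(j - i)
--         i = j
--     runs.sort()
--     return runs
-- ===== Notes on version B (the rewrite author's own statement) =====
-- stated objective: alternative
-- what changed: B drops A's running-counter fold and post-hoc wrap merge (answer[0]+=answer[-1]; del) entirely: it finds the first run boundary with a while loop, returns [] for uniform strings, otherwise rotates the string to that boundary when s[0]==s[-1] and reads the run lengths off with a single two-pointer while scan before sorting.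
import Mathlib
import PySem

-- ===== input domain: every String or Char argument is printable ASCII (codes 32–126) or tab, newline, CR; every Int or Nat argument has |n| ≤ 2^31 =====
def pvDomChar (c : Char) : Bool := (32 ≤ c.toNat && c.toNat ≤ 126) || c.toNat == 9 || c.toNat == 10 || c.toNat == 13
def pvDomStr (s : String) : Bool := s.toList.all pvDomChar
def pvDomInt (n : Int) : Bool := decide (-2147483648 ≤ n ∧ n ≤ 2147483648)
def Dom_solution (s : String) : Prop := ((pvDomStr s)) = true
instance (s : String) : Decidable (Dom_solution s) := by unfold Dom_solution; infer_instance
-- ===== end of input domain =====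

-- B rotates the string to a run boundary and scans the runs once (two-pointer
-- while loops), so the circular wrap needs no post-hoc merge; objective: alternative.

-- ===== PORT A =====
-- literal port of A: fold over range(len(s)-1) carrying (answer, cnt), then append cnt,
-- then the circular-wrap merge (answer[0] += answer[-1]; del answer[-1]) and sort.
def solution (s : String) : List Int :=
  let l := s.toList
  let st :=
    (PySem.List.pyRange 0 ((l.length : Int) - 1) 1).foldl
      (fun (st : List Int × Int) i =>
        if PySem.List.pyGetD l i ' ' = PySem.List.pyGetD l (i + 1) ' ' then
          (st.1, st.2 + 1)
        else
          (st.1 ++ [st.2], 1))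
      ([], 1)
  let answer := st.1 ++ [st.2]
  -- s[0] == s[-1] guard; indices are in range under Pre_ (s nonempty, answer nonempty)
  let answer :=
    if PySem.List.pyGetD l 0 ' ' = PySem.List.pyGetD l (-1) ' ' then
      -- answer[0] += answer[-1]; del answer[-1] (del of the last element = dropLast)
      (PySem.List.pySetD answer 0
        (PySem.List.pyGetD answer 0 0 + PySem.List.pyGetD answer (-1) 0)).dropLast
    else answer
  PySem.List.sorted answer (fun x => x) false

-- ===== PORT B =====
-- literal port of Source B.  Both python while loops have the shape
-- 'while p < n and t[p] == t[q]: p += 1'; scanSame t q p is that loop (indices in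
-- range, so t.getD is exact), runsLoop is the outer 'while i < n' loop.
def scanSame (t : List Char) (i j : Nat) : Nat :=
  if h : j < t.length then
    if t.getD j ' ' = t.getD i ' ' then scanSame t i (j+1) else j
  else j
termination_by t.length - j

theorem le_scanSame (t : List Char) (i j : Nat) : j ≤ scanSame t i j := by
  fun_induction scanSame t i j with
  | case1 j h heq ih => omega
  | case2 j h heq => omega
  | case3 j h => omega

theorem lt_scanSame (t : List Char) (i : Nat) (h : i < t.length) : i < scanSame t i i := by
  rw [scanSame]
  rw [dif_pos h, if_pos rfl]
  have := le_scanSame t i (i+1)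
  omega

def runsLoop (t : List Char) (i : Nat) (acc : List Int) : List Int :=
  if h : i < t.length then
    runsLoop t (scanSame t i i) (acc ++ [((scanSame t i i : Int)) - (i : Int)])
  else acc
termination_by t.length - i
decreasing_by have := lt_scanSame t i h; omega

def solution_alt (s : String) : List Int :=
  let l := s.toList
  -- k = 0; while k < n and s[k] == s[0]: k += 1
  let k := scanSame l 0 0
  if k = l.length then []
  else
    -- t = s[k:] + s[:k] if s[0] == s[-1] else s
    let t := if PySem.List.pyGetD l 0 ' ' = PySem.List.pyGetD l (-1) ' ' then
               PySem.List.slice l (some (k : Int)) none ++ PySem.List.slice l none (some (k : Int))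
             else l
    PySem.List.sorted (runsLoop t 0 []) (fun x => x) false

-- ===== PRECONDITION & SPEC =====
-- Pre_ excludes only the empty string, on which Python A raises IndexError at s[0].
def Pre_solution (s : String) : Prop := s ≠ ""
instance (s : String) : Decidable (Pre_solution s) := by unfold Pre_solution; infer_instance
def pvWitness_solution : String := "aab"

def Spec_solution (s : String) (out : List Int) : Prop := out = solution_alt s
instance (s : String) (out : List Int) : Decidable (Spec_solution s out) := by unfold Spec_solution; infer_instance

-- ===== CLAIM (what is proved, stated in full; the proofs are below) =====
def Claim_equal_solution : Prop := ∀ (s : String), Dom_solution s → Pre_solution s → Spec_solution s (solution s)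

-- ===== LEMMAS AND PROOFS =====

-- length of the leading run of c's
def leadCount (c : Char) : List Char → Nat
  | [] => 0
  | b :: r => if b = c then leadCount c r + 1 else 0

-- run lengths of c^cnt followed by the list
def runsC (c : Char) (cnt : Int) : List Char → List Int
  | [] => [cnt]
  | b :: r => if b = c then runsC c (cnt+1) r else cnt :: runsC b 1 r

def runsTail : List Char → List Int
  | [] => []
  | a :: r => runsC a 1 r

theorem scanSame_spec (t : List Char) (i j : Nat) :
    scanSame t i j = j + leadCount (t.getD i ' ') (t.drop j) := by
  fun_induction scanSame t i j with
  | case1 j h heq ih =>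
      rw [List.drop_eq_getElem_cons h, leadCount]
      have : t[j] = t.getD j ' ' := by simp [List.getD, List.getElem?_eq_getElem h]
      rw [this, if_pos heq]
      omega
  | case2 j h heq =>
      rw [List.drop_eq_getElem_cons h, leadCount]
      have : t[j] = t.getD j ' ' := by simp [List.getD, List.getElem?_eq_getElem h]
      rw [this, if_neg heq]
      omega
  | case3 j h =>
      rw [List.drop_eq_nil_of_le (by omega), leadCount]
      omega

theorem leadCount_le (c : Char) (xs : List Char) : leadCount c xs ≤ xs.length := by
  induction xs with
  | nil => simp [leadCount]
  | cons b r ih => by_cases h : b = c <;> simp [leadCount, h] <;> omega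

theorem runsC_leadCount (rest : List Char) : ∀ (c : Char) (cnt : Int),
    runsC c cnt rest = (cnt + (leadCount c rest : Int)) :: runsTail (rest.drop (leadCount c rest)) := by
  induction rest with
  | nil => intro c cnt; simp [runsC, leadCount, runsTail]
  | cons b r ih =>
      intro c cnt
      by_cases h : b = c
      · rw [runsC, if_pos h, ih, leadCount, if_pos h]
        subst h
        rw [List.drop_succ_cons]
        congr 1
        push_cast
        ring
      · rw [runsC, if_neg h, leadCount, if_neg h]
        simp [runsTail]

theorem runsLoop_spec (t : List Char) (i : Nat) (acc : List Int) :
    runsLoop t i acc = acc ++ runsTail (t.drop i) := by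
  fun_induction runsLoop t i acc with
  | case1 i acc h ih =>
      rw [ih]
      have hs := scanSame_spec t i i
      have hd : t.drop i = t.getD i ' ' :: t.drop (i+1) := by
        rw [List.drop_eq_getElem_cons h]
        congr 1
        simp [List.getD, List.getElem?_eq_getElem h]
      rw [hd, leadCount, if_pos rfl] at hs
      set c := t.getD i ' ' with hc
      set m := leadCount c (t.drop (i+1)) with hm
      have hdj : t.drop (scanSame t i i) = (t.drop (i+1)).drop m := by
        rw [hs]
        rw [List.drop_drop]
        congr 1
        omega
      rw [hdj, hd, runsTail, runsC_leadCount, ← hm]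
      have hlen : ((scanSame t i i : Int)) - (i : Int) = 1 + (m : Int) := by
        rw [hs]; push_cast; ring
      rw [hlen]
      simp
  | case2 i acc h =>
      rw [List.drop_eq_nil_of_le (by omega), runsTail]
      simp

theorem take_leadCount (c : Char) (xs : List Char) :
    xs.take (leadCount c xs) = List.replicate (leadCount c xs) c := by
  induction xs with
  | nil => simp [leadCount]
  | cons b r ih =>
      by_cases h : b = c
      · rw [leadCount, if_pos h, List.take_succ_cons, List.replicate_succ, ih, h]
      · rw [leadCount, if_neg h]; simp

theorem head_drop_leadCount (c : Char) (xs : List Char)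
    (h : xs.drop (leadCount c xs) ≠ []) : (xs.drop (leadCount c xs)).head h ≠ c := by
  induction xs with
  | nil => simp at h
  | cons b r ih =>
      by_cases hb : b = c
      · revert h
        rw [leadCount, if_pos hb, List.drop_succ_cons]
        exact fun h => ih h
      · revert h
        rw [leadCount, if_neg hb, List.drop_zero]
        intro h
        simpa using hb

theorem runsC_ne_nil (c : Char) (cnt : Int) (xs : List Char) : runsC c cnt xs ≠ [] := by
  induction xs generalizing c cnt with
  | nil => simp [runsC]
  | cons b r ih => by_cases h : b = c <;> simp [runsC, h, ih]

theorem runsC_replicate (c : Char) (k : Nat) : ∀ cnt : Int,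
    runsC c cnt (List.replicate k c) = [cnt + (k : Int)] := by
  induction k with
  | zero => intro cnt; simp [runsC]
  | succ m ih =>
      intro cnt
      rw [List.replicate_succ, runsC, if_pos rfl, ih]
      push_cast; ring_nf

theorem runsC_replicate_append (c : Char) (m : Nat) (ys : List Char) : ∀ cnt : Int,
    runsC c cnt (List.replicate m c ++ ys) = runsC c (cnt + (m : Int)) ys := by
  induction m with
  | zero => intro cnt; simp
  | succ p ih =>
      intro cnt
      rw [List.replicate_succ, List.cons_append, runsC, if_pos rfl, ih]
      congr 1
      push_cast; ring

theorem runsC_append_replicate (xs : List Char) : ∀ (c : Char) (cnt : Int) (k : Nat),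
    runsC c cnt (xs ++ List.replicate k (xs.getLastD c)) =
      (runsC c cnt xs).dropLast ++ [(runsC c cnt xs).getLastD 0 + (k : Int)] := by
  induction xs with
  | nil =>
      intro c cnt k
      simp only [List.getLastD_nil, List.nil_append, runsC_replicate]
      simp [runsC]
  | cons b r ih =>
      intro c cnt k
      by_cases h : b = c
      · rw [List.cons_append, runsC, if_pos h, List.getLastD_cons]
        subst h
        rw [ih b (cnt+1) k]
        have : runsC b cnt (b :: r) = runsC b (cnt+1) r := by rw [runsC, if_pos rfl]
        rw [this]
      · rw [List.cons_append, runsC, if_neg h, List.getLastD_cons, ih b 1 k]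
        have h2 : runsC c cnt (b :: r) = cnt :: runsC b 1 r := by rw [runsC, if_neg h]
        rw [h2, List.dropLast_cons_of_ne_nil (runsC_ne_nil b 1 r)]
        have h3 : (cnt :: runsC b 1 r).getLastD 0 = (runsC b 1 r).getLastD 0 := by
          have hy := List.getLast?_eq_some_getLast (l := runsC b 1 r) (runsC_ne_nil b 1 r)
          simp [List.getLastD_eq_getLast?, List.getLast?_cons, hy]
        rw [h3]
        simp

-- A's fold, recursively on the character list (consuming adjacent pairs)
def arec : List Char → (List Int × Int) → (List Int × Int)
  | [], st => st
  | [_], st => st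
  | a :: b :: r, st =>
      arec (b :: r) (if a = b then (st.1, st.2 + 1) else (st.1 ++ [st.2], 1))

theorem getD_append_self {α : Type} (pre : List α) (a : α) (r : List α) (d : α) :
    PySem.List.pyGetD (pre ++ a :: r) (pre.length : Int) d = a := by
  rw [PySem.List.pyGetD_natCast]
  simp [List.getD]

theorem getD_append_succ {α : Type} (pre : List α) (a b : α) (r : List α) (d : α) :
    PySem.List.pyGetD (pre ++ a :: b :: r) ((pre.length : Int) + 1) d = b := by
  have : (pre ++ a :: b :: r) = (pre ++ [a]) ++ b :: r := by simp
  rw [this]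
  have h : ((pre.length : Int) + 1) = (((pre ++ [a]).length : Nat) : Int) := by
    simp
  rw [h, PySem.List.pyGetD_natCast]
  simp [List.getD]

theorem afold_eq (suf : List Char) : ∀ (pre : List Char) (st : List Int × Int),
    (PySem.List.pyRange (pre.length : Int) (((pre ++ suf).length : Int) - 1) 1).foldl
      (fun (st : List Int × Int) i =>
        if PySem.List.pyGetD (pre ++ suf) i ' ' = PySem.List.pyGetD (pre ++ suf) (i + 1) ' ' then
          (st.1, st.2 + 1)
        else (st.1 ++ [st.2], 1)) st
    = arec suf st := by
  induction suf with
  | nil =>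
      intro pre st
      rw [PySem.List.pyRange_one_eq_nil (by simp)]
      simp [arec]
  | cons a r ih =>
      intro pre st
      cases r with
      | nil =>
          rw [PySem.List.pyRange_one_eq_nil (by simp)]
          simp [arec]
      | cons b r' =>
          rw [PySem.List.pyRange_one_cons (by simp; omega)]
          simp only [List.foldl_cons]
          rw [getD_append_self, getD_append_succ]
          have hr := ih (pre ++ [a]) (if a = b then (st.1, st.2 + 1) else (st.1 ++ [st.2], 1))
          simp only [List.append_assoc, List.cons_append, List.nil_append] at hr
          have hlen : ((pre ++ [a]).length : Int) = (pre.length : Int) + 1 := by simp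
          rw [hlen] at hr
          rw [hr]
          simp [arec]

theorem arec_flush (rest : List Char) : ∀ (a : Char) (ans : List Int) (c : Int),
    (arec (a :: rest) (ans, c)).1 ++ [(arec (a :: rest) (ans, c)).2] = ans ++ runsC a c rest := by
  induction rest with
  | nil => intro a ans c; simp [arec, runsC]
  | cons b r ih =>
      intro a ans c
      by_cases hab : a = b
      · rw [arec, if_pos hab, ih b ans (c+1), runsC, if_pos hab.symm]
        subst hab
        rfl
      · rw [arec, if_neg hab, ih b (ans ++ [c]) 1, runsC, if_neg (Ne.symm hab)]
        simp

theorem getLast?_drop' {α : Type} (n : Nat) : ∀ (l : List α), l.drop n ≠ [] →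
    (l.drop n).getLast? = l.getLast? := by
  induction n with
  | zero => intro l _; rfl
  | succ p ih =>
      intro l h
      cases l with
      | nil => simp at h
      | cons y l' =>
          rw [List.drop_succ_cons] at h ⊢
          rw [ih l' h]
          have hl' : l' ≠ [] := fun he => h (by simp [he])
          cases l' with
          | nil => exact absurd rfl hl'
          | cons z zs => simp [List.getLast?_cons]

-- ===== VERDICT (by name: the statement is the Claim_ definition above) =====
theorem afold_zero (l : List Char) :
    (PySem.List.pyRange 0 ((l.length : Int) - 1) 1).foldl
      (fun (st : List Int × Int) i =>
        if PySem.List.pyGetD l i ' ' = PySem.List.pyGetD l (i + 1) ' ' then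
          (st.1, st.2 + 1)
        else
          (st.1 ++ [st.2], 1))
      ([], 1) = arec l ([], 1) := by
  simpa using afold_eq l [] ([], 1)

theorem solution_spec : Claim_equal_solution := by
  intro s _ hpre
  have hl : s.toList ≠ [] := by simpa [String.toList_eq_nil_iff] using hpre
  unfold Spec_solution
  obtain ⟨a, rest, hlr⟩ := List.exists_cons_of_ne_nil hl
  simp only [solution, solution_alt]
  rw [hlr]
  rw [afold_zero, arec_flush rest a [] 1]
  simp only [List.nil_append]
  have hk : scanSame (a :: rest) 0 0 = leadCount a rest + 1 := by
    rw [scanSame_spec]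
    simp [leadCount]
  rw [hk]
  by_cases hmn : leadCount a rest = rest.length
  · -- uniform string: A merges its single run away; B sees k = n
    have hrep : rest = List.replicate rest.length a := by
      conv_lhs => rw [← List.take_length (l := rest), ← hmn, take_leadCount, hmn]
    have hlast : PySem.List.pyGetD (a :: rest) (-1) ' ' = a := by
      rw [hrep]
      rw [show a :: List.replicate rest.length a = List.replicate (rest.length + 1) a from List.replicate_succ.symm]
      rw [PySem.List.pyGetD_neg_one _ _ (by simp)]
      exact List.getLast_replicate _
    rw [if_pos (show PySem.List.pyGetD (a :: rest) 0 ' ' = PySem.List.pyGetD (a :: rest) (-1) ' ' from by rw [PySem.List.pyGetD_zero_cons]; exact hlast.symm)]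
    rw [if_pos (show leadCount a rest + 1 = (a :: rest).length from by simp [hmn])]
    have hans : runsC a 1 rest = [1 + (rest.length : Int)] := by
      conv_lhs => rw [hrep]
      rw [runsC_replicate]
    rw [hans]
    simp [PySem.List.pySetD, PySem.List.pySet?, PySem.List.pyIdx?, PySem.List.sorted]
  · -- k < n: A = runs with wrap-merge, B = runs of the rotated string
    have hmlt : leadCount a rest < rest.length := lt_of_le_of_ne (leadCount_le a rest) hmn
    have hd : rest.drop (leadCount a rest) ≠ [] := by
      rw [ne_eq, List.drop_eq_nil_iff]
      omega
    obtain ⟨x, xs, hdx⟩ := List.exists_cons_of_ne_nil hd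
    have hx : x ≠ a := by
      have h0 := head_drop_leadCount a rest hd
      simpa [hdx] using h0
    rw [if_neg (show ¬ (leadCount a rest + 1 = (a :: rest).length) from by simp; omega)]
    have hsplit : rest = List.replicate (leadCount a rest) a ++ (x :: xs) := by
      conv_lhs => rw [← List.take_append_drop (leadCount a rest) rest]
      rw [take_leadCount, hdx]
    have hansA : runsC a 1 rest = ((1 : Int) + (leadCount a rest : Int)) :: runsC x 1 xs := by
      conv_lhs => rw [hsplit]
      rw [runsC_replicate_append, runsC, if_neg hx]
    rw [hansA]
    have hRne : runsC x 1 xs ≠ [] := runsC_ne_nil x 1 xs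
    by_cases hc : PySem.List.pyGetD (a :: rest) 0 ' ' = PySem.List.pyGetD (a :: rest) (-1) ' '
    · rw [if_pos hc, if_pos hc]
      have hlast : (a :: rest).getLast (List.cons_ne_nil a rest) = a := by
        rw [PySem.List.pyGetD_zero_cons] at hc
        rw [PySem.List.pyGetD_neg_one _ _ (List.cons_ne_nil a rest)] at hc
        exact hc.symm
      rw [PySem.List.pyGetD_zero_cons]
      have hgetm1 : PySem.List.pyGetD (((1:Int) + (leadCount a rest : Int)) :: runsC x 1 xs) (-1) 0
          = (runsC x 1 xs).getLastD 0 := by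
        rw [PySem.List.pyGetD_neg_one _ _ (List.cons_ne_nil _ _), List.getLast_cons hRne]
        have hy := List.getLast?_eq_some_getLast (l := runsC x 1 xs) hRne
        simp [List.getLastD_eq_getLast?, hy]
      rw [hgetm1]
      have hset : PySem.List.pySetD (((1:Int) + (leadCount a rest : Int)) :: runsC x 1 xs) 0
          ((1:Int) + (leadCount a rest : Int) + (runsC x 1 xs).getLastD 0)
          = ((1:Int) + (leadCount a rest : Int) + (runsC x 1 xs).getLastD 0) :: runsC x 1 xs := by
        simp [PySem.List.pySetD, PySem.List.pySet?, PySem.List.pyIdx?]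
      rw [hset, List.dropLast_cons_of_ne_nil hRne]
      -- B side: the two slices are the rotation
      rw [PySem.List.slice_from_natCast, PySem.List.slice_to_natCast]
      have hdrop : (a :: rest).drop (leadCount a rest + 1) = x :: xs := by
        rw [List.drop_succ_cons]; exact hdx
      have htake : (a :: rest).take (leadCount a rest + 1) = List.replicate (leadCount a rest + 1) a := by
        rw [List.take_succ_cons, take_leadCount]
        exact List.replicate_succ.symm
      rw [hdrop, htake, runsLoop_spec, List.drop_zero, List.cons_append, runsTail]
      have hlx : xs.getLastD x = a := by
        have h2 := getLast?_drop' (leadCount a rest + 1) (a :: rest) (by rw [hdrop]; simp)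
        rw [hdrop, List.getLast?_cons] at h2
        have h3 := List.getLast?_eq_some_getLast (l := a :: rest) (List.cons_ne_nil a rest)
        rw [h3, hlast] at h2
        rw [List.getLastD_eq_getLast?]
        exact Option.some.inj h2
      have happ := runsC_append_replicate xs x 1 (leadCount a rest + 1)
      rw [hlx] at happ
      rw [happ]
      apply PySem.List.sorted_eq_sorted_of_perm _ _ _ (fun u v h => h)
      have hval : (1:Int) + (leadCount a rest : Int) + (runsC x 1 xs).getLastD 0
          = (runsC x 1 xs).getLastD 0 + ((leadCount a rest + 1 : Nat) : Int) := by
        push_cast; ring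
      rw [hval]
      exact (List.perm_append_singleton _ _).symm
    · rw [if_neg hc, if_neg hc]
      rw [runsLoop_spec, List.drop_zero, runsTail, hansA]
      simp only [List.nil_append]
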